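-- pv_equiv track=rewrite | github.com/etcadinfinitum/advent | 2021/12/solution.py | is_allowable_with_2_visits
-- ===== SOURCE A (Python) =====
-- def is_allowable_with_2_visits(path, new_item):
--     if new_item.upper() == new_item:
--         return True
--     # all lowercase from here on out
--     visits = {}
--     for item in path:
--         if item.upper() == item:
--             continue    # We don't care about uppercase anything
--         if item in visits:
--             visits[item] += 1
--         else:
--             visits[item] = 1
--     if new_item not in visits: return True
--     if new_item in visits and (new_item == 'start' or new_item == 'end'): return False
--     for item in visits:
--         if visits[item] > 1: return False
--     return True
-- ===== SOURCE B (Python) =====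
-- def is_allowable_with_2_visits(path, new_item):
--     if new_item.upper() == new_item:
--         return True
--     # sort-then-scan: duplicates of small caves become adjacent after sorting
--     smalls = sorted(item for item in path if item.upper() != item)
--     found = False
--     dup = False
--     prev = None
--     for item in smalls:
--         if item == new_item:
--             found = True
--         if prev == item:
--             dup = True
--         prev = item
--     if not found:
--         return True
--     if new_item == 'start' or new_item == 'end':
--         return False
--     return not dup
-- ===== Notes on version B (the rewrite author's own statement) =====
-- stated objective: alternative
-- what changed: Replaces A's per-cave count dict and its verdict loop over counts by sort-then-scan: the small caves are sorted once and a single adjacent-equality scan detects both membership of new_item and any twice-visited small cave, with no dict or counting at all.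
import Mathlib
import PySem

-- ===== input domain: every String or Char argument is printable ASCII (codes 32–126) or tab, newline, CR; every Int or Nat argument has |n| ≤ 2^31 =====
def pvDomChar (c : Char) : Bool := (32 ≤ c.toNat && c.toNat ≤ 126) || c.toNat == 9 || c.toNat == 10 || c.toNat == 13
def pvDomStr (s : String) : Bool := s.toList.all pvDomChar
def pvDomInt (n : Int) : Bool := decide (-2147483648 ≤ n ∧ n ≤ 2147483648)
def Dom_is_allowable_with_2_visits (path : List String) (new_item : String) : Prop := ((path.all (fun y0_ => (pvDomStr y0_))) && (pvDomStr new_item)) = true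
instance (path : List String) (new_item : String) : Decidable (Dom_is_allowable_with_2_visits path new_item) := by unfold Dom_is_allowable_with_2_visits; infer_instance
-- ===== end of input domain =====

-- B replaces A's per-cave count dict and its verdict loop over counts by sort-then-scan:
-- the small caves are sorted once and one adjacent-equality scan detects both membership
-- of new_item and any twice-visited small cave (objective: alternative; no speed claim).

-- ===== PORT A =====
def is_allowable_with_2_visits (path : List String) (new_item : String) : Bool :=
  if PySem.Str.upper new_item == new_item then true
  else
    -- all lowercase from here on out
    let visits : PySem.Dict String Int :=
      path.foldl (fun d item =>
        if PySem.Str.upper item == item then d   -- continue: we don't care about uppercase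
        else if d.contains item then d.insert item (d.getD item 0 + 1)
        else d.insert item 1) PySem.Dict.empty
    if !(visits.contains new_item) then true
    else if visits.contains new_item && (new_item == "start" || new_item == "end") then false
    else visits.keys.all (fun item => !(decide (visits.getD item 0 > 1)))

-- ===== PORT B =====
def is_allowable_with_2_visits_alt (path : List String) (new_item : String) : Bool :=
  if PySem.Str.upper new_item == new_item then true
  else
    let smalls := PySem.List.sorted (path.filter (fun item => !(PySem.Str.upper item == item))) (fun x => x) false
    -- single scan over the sorted list: state = (found, dup, prev)
    let st := smalls.foldl (fun (s : Bool × Bool × Option String) item =>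
        ((if item == new_item then true else s.1),
         (if s.2.2 == some item then true else s.2.1),
         some item)) (false, false, none)
    if !st.1 then true
    else if new_item == "start" || new_item == "end" then false
    else !st.2.1

-- ===== PRECONDITION & SPEC =====
def Spec_is_allowable_with_2_visits (path : List String) (new_item : String) (out : Bool) : Prop := out = is_allowable_with_2_visits_alt path new_item
instance (path : List String) (new_item : String) (out : Bool) : Decidable (Spec_is_allowable_with_2_visits path new_item out) := by unfold Spec_is_allowable_with_2_visits; infer_instance

-- ===== CLAIM (what is proved, stated in full; the proofs are below) =====
def Claim_equal_is_allowable_with_2_visits : Prop := ∀ (path : List String) (new_item : String), Dom_is_allowable_with_2_visits path new_item → Spec_is_allowable_with_2_visits path new_item (is_allowable_with_2_visits path new_item)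

-- ===== LEMMAS AND PROOFS =====

-- A's counting loop over `path` (skipping big caves) builds exactly Counter(smalls).
theorem pv_foldA_eq_counter (l : List String) :
    l.foldl (fun d item =>
        if PySem.Str.upper item == item then d
        else if d.contains item then d.insert item (d.getD item 0 + 1)
        else d.insert item 1) PySem.Dict.empty
      = PySem.Dict.counter (l.filter (fun item => !(PySem.Str.upper item == item))) := by
  rw [← PySem.Dict.foldl_insert_getD_add_one_eq_counter, List.foldl_filter]
  congr 1
  funext d item
  by_cases h : PySem.Str.upper item == item
  · simp [h]
  · simp only [h, Bool.not_false, if_true, if_false, Bool.false_eq_true]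
    by_cases hc : d.contains item
    · simp [hc]
    · have hc' : d.contains item = false := by simpa using hc
      have hg : d.getD item 0 = 0 := by
        have h2 := PySem.Dict.contains_eq_isSome_get? d item
        rw [hc'] at h2
        have h3 : d.get? item = none := Option.not_isSome_iff_eq_none.mp (by simp [← h2])
        simp [PySem.Dict.getD, h3]
      simp [hc', hg]

-- The two components of B's scan state, computed directly over the list.
def pvFound (n : String) (l : List String) : Bool := l.any (fun x => x == n)

def pvAdjDup (p : Option String) : List String → Bool
  | [] => false
  | x :: xs => (if p == some x then true else pvAdjDup (some x) xs)

-- B's fold: the `found` component.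
theorem pv_fold_fst (n : String) (l : List String) (f d : Bool) (p : Option String) :
    (l.foldl (fun (s : Bool × Bool × Option String) item =>
        ((if item == n then true else s.1),
         (if s.2.2 == some item then true else s.2.1),
         some item)) (f, d, p)).1 = (f || pvFound n l) := by
  induction l generalizing f d p with
  | nil => simp [pvFound]
  | cons x xs ih =>
    simp only [List.foldl_cons, ih, pvFound, List.any_cons]
    by_cases hx : x == n <;> simp [hx]

-- B's fold: the `dup` component.
theorem pv_fold_dup (n : String) (l : List String) (f d : Bool) (p : Option String) :
    (l.foldl (fun (s : Bool × Bool × Option String) item =>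
        ((if item == n then true else s.1),
         (if s.2.2 == some item then true else s.2.1),
         some item)) (f, d, p)).2.1 = (d || pvAdjDup p l) := by
  induction l generalizing f d p with
  | nil => simp [pvAdjDup]
  | cons x xs ih =>
    simp only [List.foldl_cons, ih, pvAdjDup]
    by_cases hp : p == some x <;> simp [hp]

-- In a ≤-sorted list, an adjacent equal pair exists iff the list has a duplicate.
theorem pv_adjDup_of_sorted (x : String) (xs : List String) :
    (x :: xs).Pairwise (fun a b => a ≤ b) → pvAdjDup (some x) xs = !(decide (x :: xs).Nodup) := by
  induction xs generalizing x with
  | nil => intro _; simp [pvAdjDup]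
  | cons y ys ih =>
    intro hp
    obtain ⟨hx, hp'⟩ := List.pairwise_cons.mp hp
    have hxy : x ≤ y := hx y (by simp)
    by_cases hxe : x = y
    · subst hxe
      have hmem : x ∈ x :: ys := by simp
      simp [pvAdjDup, List.nodup_cons, hmem]
    · have hlt : x < y := lt_of_le_of_ne hxy hxe
      have hxnot : x ∉ y :: ys := by
        intro hmem
        rcases List.mem_cons.mp hmem with h | h
        · exact hxe h
        · exact absurd ((List.pairwise_cons.mp hp').1 x h) (not_le.mpr hlt)
      have heq : pvAdjDup (some x) (y :: ys) = pvAdjDup (some y) ys := by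
        simp [pvAdjDup, hxe]
      rw [heq, ih y hp']
      have hiff : (x :: y :: ys).Nodup ↔ (y :: ys).Nodup := by
        simp [List.nodup_cons, hxnot]
      simp [hiff]

-- Starting from no previous element.
theorem pv_adjDup_none (S : List String) (h : S.Pairwise (fun a b => a ≤ b)) :
    pvAdjDup none S = !(decide S.Nodup) := by
  cases S with
  | nil => simp [pvAdjDup]
  | cons x xs =>
    have := pv_adjDup_of_sorted x xs h
    simpa [pvAdjDup] using this

-- ===== VERDICT (by name: the statement is the Claim_ definition above) =====
theorem is_allowable_with_2_visits_spec : Claim_equal_is_allowable_with_2_visits := by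
  intro path new_item _
  unfold Spec_is_allowable_with_2_visits is_allowable_with_2_visits is_allowable_with_2_visits_alt
  by_cases hup : PySem.Str.upper new_item == new_item
  · simp [hup]
  · simp only [hup, if_false, Bool.false_eq_true]
    rw [pv_foldA_eq_counter, pv_fold_fst, pv_fold_dup]
    set L := path.filter (fun item => !(PySem.Str.upper item == item)) with hL
    set S := PySem.List.sorted L (fun x => x) false with hS
    have hpw : S.Pairwise (fun a b => a ≤ b) := by
      simpa using PySem.List.sorted_pairwise L (fun x => x)
    have hperm : S.Perm L := PySem.List.sorted_perm L (fun x => x) false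
    have hmem : pvFound new_item S = L.contains new_item := by
      rw [Bool.eq_iff_iff]
      simp only [pvFound, List.any_eq_true, beq_iff_eq, List.contains_eq_mem, decide_eq_true_eq]
      exact ⟨fun ⟨x, hxS, he⟩ => he ▸ hperm.mem_iff.mp hxS,
             fun h => ⟨new_item, hperm.mem_iff.mpr h, rfl⟩⟩
    have hcA : (PySem.Dict.counter L).contains new_item = L.contains new_item :=
      PySem.Dict.contains_counter L new_item
    rw [hcA, Bool.false_or, hmem]
    by_cases hin : L.contains new_item
    · simp only [hin, Bool.not_true, if_false, Bool.true_and, Bool.false_eq_true]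
      by_cases hse : (new_item == "start" || new_item == "end")
      · simp [hse]
      · simp only [hse, if_false, Bool.false_eq_true]
        have hall : ((PySem.Dict.counter L).keys.all
            (fun item => !(decide ((PySem.Dict.counter L).getD item 0 > 1))) = true)
            ↔ L.Nodup := by
          rw [PySem.Dict.keys_counter]
          simp only [List.all_eq_true, PySem.Dict.getD_counter, Bool.not_eq_eq_eq_not,
            Bool.not_true, decide_eq_false_iff_not, not_lt]
          constructor
          · intro h
            rw [List.nodup_iff_count_le_one]
            intro a
            by_cases ha : a ∈ L
            · exact_mod_cast h a (by rw [PySem.Set.mem_ofList]; exact ha)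
            · simp [List.count_eq_zero_of_not_mem ha]
          · intro h a _
            exact_mod_cast (List.nodup_iff_count_le_one.mp h) a
        have hnd : S.Nodup ↔ L.Nodup := hperm.nodup_iff
        rw [Bool.false_or, pv_adjDup_none S hpw, Bool.not_not, Bool.eq_iff_iff,
          decide_eq_true_eq]
        exact hall.trans hnd.symm
    · have hm : new_item ∉ L := by simpa using hin
      simp [hm]
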